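-- pv_equiv track=rewrite | github.com/klo9klo9kloi/TJHSST-AI | ai/Games/ghostv2.py | givePoss
-- ===== SOURCE A (Python) =====
-- def givePoss(word, wordlist):
--   possible = []
--   size = len(word)
--   for strings in wordlist:
--     string = strings[:size]
--     if word == string:
--       possible.append(strings)
--   if len(possible) == 0:
--     return possible
--   hints = []
--   for poss in possible:
--     letter = poss[size: size+1]
--     if letter not in hints:
--       hints.append(letter)
--   if len(hints) > 0:
--     return sorted(hints)
--   return possible
-- ===== SOURCE B (Python) =====
-- def _insert(hints, x):
--   # ordered insertion into a sorted duplicate-free list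
--   if not hints or x < hints[0]:
--     return [x] + hints
--   if x == hints[0]:
--     return hints
--   return [hints[0]] + _insert(hints[1:], x)
--
-- def givePoss(word, wordlist):
--   size = len(word)
--   hints = []
--   for s in wordlist:
--     if s.startswith(word):
--       hints = _insert(hints, s[size:size + 1])
--   return hints
-- ===== Notes on version B (the rewrite author's own statement) =====
-- stated objective: alternative
-- what changed: One scan with startswith maintaining an always-sorted duplicate-free hints list by ordered insertion, so the intermediate list of matching words, the membership-scan dedup pass and the final sorted() call all disappear.
import Mathlib
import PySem

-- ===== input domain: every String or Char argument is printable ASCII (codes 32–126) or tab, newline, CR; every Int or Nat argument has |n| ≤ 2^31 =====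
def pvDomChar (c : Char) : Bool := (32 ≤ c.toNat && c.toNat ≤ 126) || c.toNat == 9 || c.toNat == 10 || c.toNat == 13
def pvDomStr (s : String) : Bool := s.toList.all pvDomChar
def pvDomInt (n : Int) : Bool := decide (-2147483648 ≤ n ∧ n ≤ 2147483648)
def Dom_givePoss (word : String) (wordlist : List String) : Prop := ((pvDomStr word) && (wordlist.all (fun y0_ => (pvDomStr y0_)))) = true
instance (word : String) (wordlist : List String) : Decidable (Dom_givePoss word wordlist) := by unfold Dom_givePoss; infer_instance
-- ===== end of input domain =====

-- B replaces A's staged passes (collect matching words, dedup next letters with a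
-- membership-scanned list, then sorted()) by one scan that keeps the hints list
-- sorted and duplicate-free through ordered insertion; objective: alternative.

-- ===== PORT A =====
def givePoss (word : String) (wordlist : List String) : List String :=
  let size : Int := PySem.Str.len word
  let possible : List String := wordlist.foldl (fun acc strings =>
    let string := PySem.Str.slice strings none (some size)
    if word = string then acc ++ [strings] else acc) []
  if possible.length = 0 then possible
  else
    let hints : List String := possible.foldl (fun h poss =>
      let letter := PySem.Str.slice poss (some size) (some (size + 1))
      if h.contains letter then h else h ++ [letter]) []
    if hints.length > 0 then PySem.List.sorted hints (fun x => x) false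
    else possible

-- ===== PORT B =====
-- ordered insertion into a sorted duplicate-free list (Source B's _insert)
def pvInsert (hints : List String) (x : String) : List String :=
  match hints with
  | [] => [x]
  | h :: t =>
      if x < h then x :: h :: t
      else if x = h then h :: t
      else h :: pvInsert t x

def givePoss_alt (word : String) (wordlist : List String) : List String :=
  let size : Int := PySem.Str.len word
  wordlist.foldl (fun hints s =>
    if PySem.Str.startswith s word then
      pvInsert hints (PySem.Str.slice s (some size) (some (size + 1)))
    else hints) []

-- ===== PRECONDITION & SPEC =====
def Spec_givePoss (word : String) (wordlist : List String) (out : List String) : Prop := out = givePoss_alt word wordlist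
instance (word : String) (wordlist : List String) (out : List String) : Decidable (Spec_givePoss word wordlist out) := by unfold Spec_givePoss; infer_instance

-- ===== CLAIM (what is proved, stated in full; the proofs are below) =====
def Claim_equal_givePoss : Prop := ∀ (word : String) (wordlist : List String), Dom_givePoss word wordlist → Spec_givePoss word wordlist (givePoss word wordlist)

-- ===== LEMMAS AND PROOFS =====

theorem pv_mem_insert (hints : List String) (x a : String) :
    a ∈ pvInsert hints x ↔ a = x ∨ a ∈ hints := by
  induction hints with
  | nil => simp [pvInsert]
  | cons h t ih =>
      simp only [pvInsert]
      split_ifs with h1 h2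
      · simp only [List.mem_cons]; try tauto
      · subst h2; simp only [List.mem_cons]; try tauto
      · simp only [List.mem_cons, ih]; try tauto

theorem pv_insert_pairwise (hints : List String) (x : String)
    (hs : hints.Pairwise (· < ·)) : (pvInsert hints x).Pairwise (· < ·) := by
  induction hints with
  | nil => simp [pvInsert]
  | cons h t ih =>
      rw [List.pairwise_cons] at hs
      simp only [pvInsert]
      split_ifs with h1 h2
      · exact List.pairwise_cons.mpr ⟨by
          intro a ha; rcases List.mem_cons.mp ha with rfl | ha
          · exact h1
          · exact lt_trans h1 (hs.1 a ha), List.pairwise_cons.mpr hs⟩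
      · exact List.pairwise_cons.mpr hs
      · refine List.pairwise_cons.mpr ⟨?_, ih hs.2⟩
        intro a ha
        rcases (pv_mem_insert t x a).mp ha with rfl | ha
        · exact lt_of_le_of_ne (not_lt.mp h1) (Ne.symm h2)
        · exact hs.1 a ha

theorem pv_fold_insert_mem (l : List String) (f : String → String) :
    ∀ (init : List String) (a : String),
      a ∈ l.foldl (fun h s => pvInsert h (f s)) init ↔ a ∈ init ∨ ∃ s ∈ l, a = f s := by
  induction l with
  | nil => simp
  | cons x xs ih =>
      intro init a
      simp only [List.foldl_cons, ih, pv_mem_insert, List.mem_cons]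
      aesop

theorem pv_fold_insert_pairwise (l : List String) (f : String → String) :
    ∀ (init : List String), init.Pairwise (· < ·) →
      (l.foldl (fun h s => pvInsert h (f s)) init).Pairwise (· < ·) := by
  induction l with
  | nil => intro init h; simpa using h
  | cons x xs ih =>
      intro init h
      exact ih _ (pv_insert_pairwise init (f x) h)

-- s.startswith(word) is exactly A's test word == s[:len(word)]
theorem pv_startswith_eq_slice (s word : String) :
    PySem.Str.startswith s word = decide (word = PySem.Str.slice s none (some (PySem.Str.len word))) := by
  by_cases h : PySem.Str.startswith s word = true
  · have hp := (PySem.Chars.startswith_iff s.toList word.toList).mp (by simpa using h)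
    have ht : word.toList = s.toList.take word.toList.length := List.prefix_iff_eq_take.mp hp
    rw [h, eq_comm, decide_eq_true_iff]
    apply String.toList_inj.mp
    rw [show PySem.Str.slice s none (some (PySem.Str.len word)) =
          String.ofList (PySem.Chars.slice s.toList none (some (PySem.Str.len word))) from rfl]
    rw [String.toList_ofList, PySem.Str.len,
      show PySem.Chars.slice s.toList none (some ((word.toList.length : Nat) : Int)) =
        PySem.List.slice s.toList none (some ((word.toList.length : Nat) : Int)) from rfl,
      PySem.List.slice_to_natCast]
    exact ht
  · rw [Bool.not_eq_true] at h
    rw [h, eq_comm, decide_eq_false_iff_not]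
    intro heq
    have hfalse : PySem.Str.startswith s word = true := by
      simp only [PySem.Str.startswith_eq]
      apply (PySem.Chars.startswith_iff s.toList word.toList).mpr
      apply List.prefix_iff_eq_take.mpr
      have hl : word.toList = (PySem.Str.slice s none (some (PySem.Str.len word))).toList := by rw [← heq]
      rwa [show PySem.Str.slice s none (some (PySem.Str.len word)) =
            String.ofList (PySem.Chars.slice s.toList none (some (PySem.Str.len word))) from rfl,
        String.toList_ofList, PySem.Str.len,
        show PySem.Chars.slice s.toList none (some ((word.toList.length : Nat) : Int)) =
          PySem.List.slice s.toList none (some ((word.toList.length : Nat) : Int)) from rfl,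
        PySem.List.slice_to_natCast] at hl
    rw [h] at hfalse
    exact Bool.false_ne_true hfalse

-- ===== VERDICT (by name: the statement is the Claim_ definition above) =====
theorem givePoss_spec : Claim_equal_givePoss := by
  unfold Claim_equal_givePoss
  intro word wordlist _
  unfold Spec_givePoss givePoss givePoss_alt
  simp only []
  set size : Int := PySem.Str.len word with hsize
  set f : String → String := fun s => PySem.Str.slice s (some size) (some (size + 1)) with hf
  set p : String → Bool := fun s => decide (word = PySem.Str.slice s none (some size)) with hp
  -- A's first loop is the filter of p
  have hposs : wordlist.foldl (fun acc strings =>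
      let string := PySem.Str.slice strings none (some size)
      if word = string then acc ++ [strings] else acc) [] = wordlist.filter p := by
    rw [PySem.List.foldl_append_ite_eq_filter]
    simp [hp]
  -- B's loop is the fold of pvInsert over the same filtered list
  have hB : wordlist.foldl (fun hints s =>
      if PySem.Str.startswith s word then pvInsert hints (f s) else hints) [] =
      (wordlist.filter p).foldl (fun h s => pvInsert h (f s)) [] := by
    rw [List.foldl_filter]
    apply PySem.List.foldl_congr_mem
    intro acc a _
    rw [pv_startswith_eq_slice, ← hsize]
  rw [hposs, hB]
  set fl := wordlist.filter p with hfl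
  set B := fl.foldl (fun h s => pvInsert h (f s)) [] with hBdef
  -- A's dedup loop is Set.ofList of the letters
  have hhints : fl.foldl (fun h poss =>
      let letter := f poss
      if h.contains letter then h else h ++ [letter]) [] = PySem.Set.ofList (fl.map f) := by
    rw [PySem.Set.ofList_eq_foldl, List.foldl_map]
    rfl
  by_cases hnil : fl = []
  · simp [hnil, hBdef]
  · -- both sides are the strictly sorted arrangement of the letters of the matches
    have hBpw : B.Pairwise (· < ·) := pv_fold_insert_pairwise fl f [] (by simp)
    have hBmem : ∀ a, a ∈ B ↔ a ∈ PySem.Set.ofList (fl.map f) := by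
      intro a
      rw [hBdef, pv_fold_insert_mem, PySem.Set.mem_ofList]
      simp [eq_comm]
    have hperm : B.Perm (PySem.Set.ofList (fl.map f)) := by
      rw [List.perm_ext_iff_of_nodup (hBpw.imp ne_of_lt) (PySem.Set.nodup_ofList _)]
      exact hBmem
    have hsne : PySem.Set.ofList (fl.map f) ≠ [] := by
      rcases fl with _ | ⟨x, xs⟩
      · exact absurd rfl hnil
      · intro h
        have : f x ∈ PySem.Set.ofList ((x :: xs).map f) := by
          rw [PySem.Set.mem_ofList]; simp
        rw [h] at this; exact absurd this (List.not_mem_nil)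
    rw [if_neg (by simpa using hnil), hhints,
      if_pos (by simpa [List.length_pos_iff] using hsne)]
    exact (PySem.List.sorted_eq_of_perm_of_pairwise_lt _ _ (fun x => x) hperm hBpw)
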